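-- pv_equiv track=rewrite | github.com/longlivedrgn/Algorhythm | 프로그래머스/5/49190. 방의 개수/방의 개수.py | solution
-- ===== SOURCE A (Python) =====
-- from collections import defaultdict
-- from collections import deque
--
-- def solution(arrows):
--     answer = 0
--
--     directions = [(-1, 0), (-1, 1), (0, 1), (1, 1),
--             (1, 0), (1, -1), (0, -1), (-1, -1)] # 방향을 담자!...
--     visited = defaultdict(int)
--     visited_path = defaultdict(int)
--
--     queue = deque()
--     queue.append((0,0))
--     value = (0,0)
--     for arrow in arrows:
--         val = directions[arrow]
--         for _ in range(2):
--             moved = (value[0] + val[0], value[1] + val[1])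
--             queue.append(moved)
--             value = moved
--
--     now = queue.popleft()
--     visited[now] = 1
--
--     while queue:
--         next = queue.popleft()
--
--         if visited[next] == 1:
--             if visited_path[(now, next)] == 0:
--                 answer += 1
--         else:
--             visited[next] = 1
--
--         visited_path[(now, next)] += 1
--         visited_path[(next, now)] += 1
--         now = next
--
--     return answer
-- ===== SOURCE B (Python) =====
-- def solution(arrows):
--     directions = [(-1, 0), (-1, 1), (0, 1), (1, 1),
--                   (1, 0), (1, -1), (0, -1), (-1, -1)]
--     now = (0, 0)
--     vertices = {now}
--     edges = set()
--     for arrow in arrows: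
--         dx, dy = directions[arrow]
--         for _ in range(2):
--             nxt = (now[0] + dx, now[1] + dy)
--             vertices.add(nxt)
--             edges.add((min(now, nxt), max(now, nxt)))
--             now = nxt
--     # path graph is connected: rooms = independent cycles = E - V + 1
--     return len(edges) - len(vertices) + 1
-- ===== Notes on version B (the rewrite author's own statement) =====
-- stated objective: alternative
-- what changed: A detects rooms online while replaying the walk (incrementing the answer each time an already-visited vertex is reached over a fresh segment, with a directed-pair visit-count dict); B just collects the vertex set and the undirected edge set of the doubled path in one pass and returns len(edges) - len(vertices) + 1, the cycle rank of the connected walk graph.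
import Mathlib
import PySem

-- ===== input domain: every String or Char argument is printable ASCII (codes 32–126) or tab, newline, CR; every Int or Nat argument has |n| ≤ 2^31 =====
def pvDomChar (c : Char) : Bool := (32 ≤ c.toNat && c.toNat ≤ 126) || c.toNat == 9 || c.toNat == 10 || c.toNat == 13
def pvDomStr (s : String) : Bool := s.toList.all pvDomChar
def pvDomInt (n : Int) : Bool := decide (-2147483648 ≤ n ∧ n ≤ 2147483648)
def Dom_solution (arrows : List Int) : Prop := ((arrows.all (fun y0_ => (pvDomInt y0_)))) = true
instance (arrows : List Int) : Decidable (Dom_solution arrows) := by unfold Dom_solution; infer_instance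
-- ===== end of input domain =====

-- B replaces A's online room detection by one walk that just collects the vertex set and the
-- undirected edge set of the doubled path and returns |E| - |V| + 1 (cycle rank of the
-- connected walk graph); equivalence of the return values is proved below.

-- ===== PORT A =====

-- the eight direction vectors (shared module constant of both programs)
def pvDirs : List (Int × Int) :=
  [(-1, 0), (-1, 1), (0, 1), (1, 1), (1, 0), (1, -1), (0, -1), (-1, -1)]

-- directions[arrow]; Python's negative-index wraparound via pyGet?; out-of-range (IndexError)
-- is excluded by Pre_solution, the default (0,0) is never read there
def pvDir (arrow : Int) : Int × Int := (PySem.List.pyGet? pvDirs arrow).getD (0, 0)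

-- one iteration of A's queue-building loop body (the inner `for _ in range(2)` unrolled)
def pvStepQ (st : List (Int × Int) × (Int × Int)) (arrow : Int) :
    List (Int × Int) × (Int × Int) :=
  let val := pvDir arrow
  let m1 := (st.2.1 + val.1, st.2.2 + val.2)
  let m2 := (m1.1 + val.1, m1.2 + val.2)
  (st.1 ++ [m1, m2], m2)

-- A's while-loop body; state = (answer, visited, visited_path, now)
def pvStepA
    (st : Int × PySem.Dict (Int × Int) Int ×
          PySem.Dict ((Int × Int) × (Int × Int)) Int × (Int × Int))
    (nxt : Int × Int) :
    Int × PySem.Dict (Int × Int) Int ×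
    PySem.Dict ((Int × Int) × (Int × Int)) Int × (Int × Int) :=
  (if st.2.1.getD nxt 0 = 1 then
     (if st.2.2.1.getD (st.2.2.2, nxt) 0 = 0 then st.1 + 1 else st.1)
   else st.1,
   (if st.2.1.getD nxt 0 = 1 then st.2.1 else st.2.1.insert nxt 1),
   ((st.2.2.1.modify (st.2.2.2, nxt) 0 (· + 1)).modify (nxt, st.2.2.2) 0 (· + 1)),
   nxt)

def solution (arrows : List Int) : Int :=
  let qv := arrows.foldl pvStepQ ([((0 : Int), (0 : Int))], ((0 : Int), (0 : Int)))
  match qv.1 with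
  | [] => 0   -- unreachable: the queue starts with (0,0)
  | now :: rest =>
      (rest.foldl pvStepA (0, PySem.Dict.empty.insert now 1, PySem.Dict.empty, now)).1

-- ===== PORT B =====

-- Python tuple comparison min/max (lexicographic), used to store edges undirected
def pvMin (p q : Int × Int) : Int × Int :=
  if p.1 < q.1 ∨ (p.1 = q.1 ∧ p.2 ≤ q.2) then p else q
def pvMax (p q : Int × Int) : Int × Int :=
  if p.1 < q.1 ∨ (p.1 = q.1 ∧ p.2 ≤ q.2) then q else p

-- one unit step of B: record the new vertex and the undirected segment, move there
def pvStepB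
    (st : PySem.Set (Int × Int) × PySem.Set ((Int × Int) × (Int × Int)) × (Int × Int))
    (nxt : Int × Int) :
    PySem.Set (Int × Int) × PySem.Set ((Int × Int) × (Int × Int)) × (Int × Int) :=
  (PySem.Set.add st.1 nxt,
   PySem.Set.add st.2.1 (pvMin st.2.2 nxt, pvMax st.2.2 nxt),
   nxt)

-- B's per-arrow body: the `for _ in range(2)` unrolled into two unit steps
def pvArrowB
    (st : PySem.Set (Int × Int) × PySem.Set ((Int × Int) × (Int × Int)) × (Int × Int))
    (arrow : Int) :
    PySem.Set (Int × Int) × PySem.Set ((Int × Int) × (Int × Int)) × (Int × Int) :=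
  let d := pvDir arrow
  let n1 := (st.2.2.1 + d.1, st.2.2.2 + d.2)
  let st1 := pvStepB st n1
  let n2 := (n1.1 + d.1, n1.2 + d.2)
  pvStepB st1 n2

def solution_alt (arrows : List Int) : Int :=
  let fin := arrows.foldl pvArrowB
    ([((0 : Int), (0 : Int))], ([] : PySem.Set ((Int × Int) × (Int × Int))),
     ((0 : Int), (0 : Int)))
  (fin.2.1.length : Int) - (fin.1.length : Int) + 1

-- ===== PRECONDITION & SPEC =====
-- Pre_ excludes exactly the inputs where Python A raises IndexError:
-- directions[arrow] needs -8 ≤ arrow < 8 (negative indices wrap in Python).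
def Pre_solution (arrows : List Int) : Prop := ∀ a ∈ arrows, -8 ≤ a ∧ a < 8
instance (arrows : List Int) : Decidable (Pre_solution arrows) := by
  unfold Pre_solution; infer_instance

def pvWitness_solution : List Int := [6, 6, 6, 4, 4, 4, 2, 2, 2, 0, 0, 0, 1, 6, 5, 5, 3, 6, 0]

def Spec_solution (arrows : List Int) (out : Int) : Prop := out = solution_alt arrows
instance (arrows : List Int) (out : Int) : Decidable (Spec_solution arrows out) := by
  unfold Spec_solution; infer_instance

-- ===== CLAIM (what is proved, stated in full; the proofs are below) =====
def Claim_equal_solution : Prop :=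
  ∀ (arrows : List Int), Dom_solution arrows → Pre_solution arrows →
    Spec_solution arrows (solution arrows)

-- ===== LEMMAS AND PROOFS =====

-- the list of points of the doubled path starting at v (two per arrow)
def pvPts (v : Int × Int) (arrows : List Int) : List (Int × Int) :=
  match arrows with
  | [] => []
  | a :: rest =>
      let d := pvDir a
      let m1 := (v.1 + d.1, v.2 + d.2)
      let m2 := (m1.1 + d.1, m1.2 + d.2)
      m1 :: m2 :: pvPts m2 rest

-- final position of the doubled path
def pvEnd (v : Int × Int) (arrows : List Int) : Int × Int :=
  match arrows with
  | [] => v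
  | a :: rest =>
      let d := pvDir a
      pvEnd (v.1 + d.1 + d.1, v.2 + d.2 + d.2) rest

-- A's queue-building fold produces acc ++ the point list
theorem pvQfold (arrows : List Int) : ∀ (acc : List (Int × Int)) (v : Int × Int),
    arrows.foldl pvStepQ (acc, v) = (acc ++ pvPts v arrows, pvEnd v arrows) := by
  induction arrows with
  | nil => intro acc v; simp [pvPts, pvEnd]
  | cons a rest ih =>
      intro acc v
      simp only [List.foldl_cons, pvStepQ, pvPts, pvEnd, ih, List.append_assoc]
      rfl

-- B's per-arrow fold = per-point fold over the same point list
theorem pvBfold (arrows : List Int) :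
    ∀ (st : PySem.Set (Int × Int) × PySem.Set ((Int × Int) × (Int × Int)) × (Int × Int)),
    arrows.foldl pvArrowB st = (pvPts st.2.2 arrows).foldl pvStepB st := by
  induction arrows with
  | nil => intro st; simp [pvPts]
  | cons a rest ih =>
      intro st
      simp only [List.foldl_cons, pvArrowB, pvPts, ih, pvStepB]

-- pvMin/pvMax pick out the two endpoints in one of the two orders
theorem pvCanon_cases (p q : Int × Int) :
    (pvMin p q, pvMax p q) = (p, q) ∨ (pvMin p q, pvMax p q) = (q, p) := by
  unfold pvMin pvMax
  split_ifs <;> simp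

theorem pvMin_comm (p q : Int × Int) : pvMin p q = pvMin q p := by
  obtain ⟨a, b⟩ := p; obtain ⟨c, d⟩ := q
  unfold pvMin
  split_ifs <;> simp_all [Prod.mk.injEq] <;> omega

theorem pvMax_comm (p q : Int × Int) : pvMax p q = pvMax q p := by
  obtain ⟨a, b⟩ := p; obtain ⟨c, d⟩ := q
  unfold pvMax
  split_ifs <;> simp_all [Prod.mk.injEq] <;> omega

-- the undirected edge determines its endpoint pair up to swap
theorem pvCanon_eq_iff (p q r s : Int × Int) :
    (pvMin p q, pvMax p q) = (pvMin r s, pvMax r s) ↔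
      (p = r ∧ q = s) ∨ (p = s ∧ q = r) := by
  constructor
  · intro h
    rcases pvCanon_cases p q with h1 | h1 <;> rcases pvCanon_cases r s with h2 | h2 <;>
      rw [h1, h2] at h <;> simp only [Prod.mk.injEq] at h <;> tauto
  · rintro (⟨h1, h2⟩ | ⟨h1, h2⟩)
    · rw [h1, h2]
    · rw [h1, h2, pvMin_comm, pvMax_comm]

-- the main invariant: A's running answer equals |E| - |V| + 1 of B's sets
theorem pvInvariant (l : List (Int × Int)) :
    ∀ (ans : Int) (vis : PySem.Dict (Int × Int) Int)
      (path : PySem.Dict ((Int × Int) × (Int × Int)) Int)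
      (verts : PySem.Set (Int × Int))
      (edges : PySem.Set ((Int × Int) × (Int × Int))) (now : Int × Int),
    (∀ p, vis.getD p 0 = 1 ↔ p ∈ verts) →
    (∀ p q, path.getD (p, q) 0 ≠ 0 ↔ (pvMin p q, pvMax p q) ∈ edges) →
    (∀ p q, 0 ≤ path.getD (p, q) 0) →
    (∀ e ∈ edges, e.1 ∈ verts ∧ e.2 ∈ verts) →
    now ∈ verts →
    verts.Nodup → edges.Nodup →
    ans = (edges.length : Int) - (verts.length : Int) + 1 →
    (l.foldl pvStepA (ans, vis, path, now)).1
      = (((l.foldl pvStepB (verts, edges, now)).2.1.length : Int)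
         - ((l.foldl pvStepB (verts, edges, now)).1.length : Int) + 1) := by
  induction l with
  | nil => intro ans vis path verts edges now h1 h2 h3 h4 h5 h6 h7 h8; simpa using h8
  | cons nxt rest ih =>
    intro ans vis path verts edges now h1 h2 h3 h4 h5 h6 h7 h8
    simp only [List.foldl_cons, pvStepA, pvStepB]
    have hpath : ∀ p q : Int × Int,
        ((path.modify (now, nxt) 0 (· + 1)).modify (nxt, now) 0 (· + 1)).getD (p, q) 0 ≠ 0 ↔
        (pvMin p q, pvMax p q) ∈ PySem.Set.add edges (pvMin now nxt, pvMax now nxt) := by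
      intro p q
      rw [PySem.Set.mem_add]
      have h30 := h3 now nxt; have h31 := h3 nxt now; have h32 := h3 p q
      by_cases hA : ((p, q) : (Int × Int) × (Int × Int)) = (nxt, now) <;>
        by_cases hB : ((p, q) : (Int × Int) × (Int × Int)) = (now, nxt)
      · constructor
        · intro _; right; rw [pvCanon_eq_iff]
          rw [Prod.mk.injEq] at hA; tauto
        · intro _; simp only [PySem.Dict.getD_modify]
          split_ifs <;> omega
      · constructor
        · intro _; right; rw [pvCanon_eq_iff]
          rw [Prod.mk.injEq] at hA; tauto
        · intro _; simp only [PySem.Dict.getD_modify]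
          split_ifs <;> omega
      · constructor
        · intro _; right; rw [pvCanon_eq_iff]
          rw [Prod.mk.injEq] at hB; tauto
        · intro _; simp only [PySem.Dict.getD_modify]
          split_ifs <;> omega
      · simp only [PySem.Dict.getD_modify, if_neg hA, if_neg hB]
        rw [h2 p q]
        have hne : ¬ ((pvMin p q, pvMax p q) = (pvMin now nxt, pvMax now nxt)) := by
          rw [pvCanon_eq_iff]
          rintro (⟨hp, hq⟩ | ⟨hp, hq⟩)
          · exact hB (by rw [hp, hq])
          · exact hA (by rw [hp, hq])
        tauto
    have hnn : ∀ p q : Int × Int,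
        0 ≤ ((path.modify (now, nxt) 0 (· + 1)).modify (nxt, now) 0 (· + 1)).getD (p, q) 0 := by
      intro p q
      simp only [PySem.Dict.getD_modify]
      have := h3 now nxt; have := h3 nxt now; have := h3 p q
      split_ifs <;> omega
    have hends : ∀ e ∈ PySem.Set.add edges (pvMin now nxt, pvMax now nxt),
        e.1 ∈ PySem.Set.add verts nxt ∧ e.2 ∈ PySem.Set.add verts nxt := by
      intro e he
      rw [PySem.Set.mem_add] at he
      rcases he with he | he
      · exact ⟨(PySem.Set.mem_add ..).mpr (Or.inl (h4 e he).1),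
               (PySem.Set.mem_add ..).mpr (Or.inl (h4 e he).2)⟩
      · rcases pvCanon_cases now nxt with hc | hc <;> rw [he, hc] <;>
          exact ⟨(PySem.Set.mem_add ..).mpr (by tauto), (PySem.Set.mem_add ..).mpr (by tauto)⟩
    have hnowmem : nxt ∈ PySem.Set.add verts nxt := (PySem.Set.mem_add ..).mpr (Or.inr rfl)
    have hnd1 : (PySem.Set.add verts nxt).Nodup := PySem.Set.nodup_add _ _ h6
    have hnd2 : (PySem.Set.add edges (pvMin now nxt, pvMax now nxt)).Nodup :=
      PySem.Set.nodup_add _ _ h7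
    by_cases hv : vis.getD nxt 0 = 1
    · have hmem : nxt ∈ verts := (h1 nxt).1 hv
      have hverts : PySem.Set.add verts nxt = verts := PySem.Set.add_of_mem hmem
      rw [if_pos hv, if_pos hv]
      by_cases he : path.getD (now, nxt) 0 = 0
      · have hce : (pvMin now nxt, pvMax now nxt) ∉ edges := by
          intro hc; exact absurd he ((h2 now nxt).2 hc)
        have hedges : PySem.Set.add edges (pvMin now nxt, pvMax now nxt)
            = edges ++ [(pvMin now nxt, pvMax now nxt)] := PySem.Set.add_of_not_mem hce
        rw [if_pos he]
        refine ih (ans + 1) vis _ _ _ nxt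
          (by rw [hverts]; exact h1) hpath hnn hends hnowmem hnd1 hnd2 ?_
        rw [hverts, hedges]
        simp only [List.length_append, List.length_singleton]
        push_cast
        omega
      · have hce : (pvMin now nxt, pvMax now nxt) ∈ edges := (h2 now nxt).1 he
        have hedges : PySem.Set.add edges (pvMin now nxt, pvMax now nxt) = edges :=
          PySem.Set.add_of_mem hce
        rw [if_neg he]
        refine ih ans vis _ _ _ nxt
          (by rw [hverts]; exact h1) hpath hnn hends hnowmem hnd1 hnd2 ?_
        rw [hverts, hedges]; exact h8
    · have hmem : nxt ∉ verts := fun hc => hv ((h1 nxt).2 hc)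
      have hverts : PySem.Set.add verts nxt = verts ++ [nxt] :=
        PySem.Set.add_of_not_mem hmem
      have hce : (pvMin now nxt, pvMax now nxt) ∉ edges := by
        intro hc
        rcases pvCanon_cases now nxt with hcc | hcc <;> rw [Prod.mk.injEq] at hcc
        · exact hmem (hcc.2 ▸ (h4 _ hc).2)
        · exact hmem (hcc.1 ▸ (h4 _ hc).1)
      have hedges : PySem.Set.add edges (pvMin now nxt, pvMax now nxt)
          = edges ++ [(pvMin now nxt, pvMax now nxt)] := PySem.Set.add_of_not_mem hce
      have hvis : ∀ p, (vis.insert nxt 1).getD p 0 = 1 ↔ p ∈ PySem.Set.add verts nxt := by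
        intro p
        rw [PySem.Dict.getD_insert, PySem.Set.mem_add]
        by_cases hp : p = nxt
        · simp [hp]
        · rw [if_neg hp, h1 p]
          constructor
          · exact Or.inl
          · rintro (h | h); exact h; exact absurd h hp
      rw [if_neg hv, if_neg hv]
      refine ih ans _ _ _ _ nxt hvis hpath hnn hends hnowmem hnd1 hnd2 ?_
      rw [hverts, hedges]
      simp only [List.length_append, List.length_singleton]
      push_cast
      omega

-- ===== VERDICT (by name: the statement is the Claim_ definition above) =====
theorem solution_spec : Claim_equal_solution := by
  intro arrows _ _
  unfold Spec_solution solution solution_alt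
  rw [pvQfold, pvBfold]
  simp only []
  exact pvInvariant (pvPts ((0:Int),(0:Int)) arrows) 0 _ _ _ _ _
    (by intro p
        rw [PySem.Dict.getD_insert]
        constructor
        · intro h; by_cases hp : p = ((0:Int),(0:Int)) <;> simp_all [PySem.Dict.getD_empty]
        · intro h; simp at h; simp [h])
    (by intro p q; simp [PySem.Dict.getD_empty])
    (by intro p q; simp [PySem.Dict.getD_empty])
    (by intro e he; simp at he)
    (by simp)
    (by simp)
    (by simp)
    (by simp)
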